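-- pv_equiv track=rewrite | github.com/AMairesse/Nova | nova/file_utils.py | sanitize_user_path
-- ===== SOURCE A (Python) =====
-- import posixpath
--
-- def sanitize_user_path(raw: str) -> str:
--     # Ensure POSIX-style, enforce leading slash, collapse .. safely
--     if raw is None:
--         raw = ''
--     norm = posixpath.normpath('/' + raw.lstrip('/'))
--     # Reject attempts to escape
--     parts = [p for p in norm.split('/') if p]
--     if '..' in parts:
--         raise PermissionError("Invalid path")
--     return '/' + '/'.join(parts)
-- ===== SOURCE B (Python) =====
-- def sanitize_user_path(raw: str) -> str:
--     # Single pass with an explicit stack instead of posixpath.normpath + re-split.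
--     stack = []
--     for comp in ('' if raw is None else raw).split('/'):
--         if comp == '' or comp == '.':
--             continue
--         if comp == '..':
--             if stack:
--                 stack.pop()
--         else:
--             stack.append(comp)
--     return '/' + '/'.join(stack)
-- ===== Notes on version B (the rewrite author's own statement) =====
-- stated objective: simpler
-- what changed: Replaces posixpath.normpath plus a second split/filter/membership pass with one explicit-stack fold over the slash-separated components (skip empty and current-dir entries, pop on parent-dir entries, push the rest) followed by a single join.
import Mathlib
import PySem

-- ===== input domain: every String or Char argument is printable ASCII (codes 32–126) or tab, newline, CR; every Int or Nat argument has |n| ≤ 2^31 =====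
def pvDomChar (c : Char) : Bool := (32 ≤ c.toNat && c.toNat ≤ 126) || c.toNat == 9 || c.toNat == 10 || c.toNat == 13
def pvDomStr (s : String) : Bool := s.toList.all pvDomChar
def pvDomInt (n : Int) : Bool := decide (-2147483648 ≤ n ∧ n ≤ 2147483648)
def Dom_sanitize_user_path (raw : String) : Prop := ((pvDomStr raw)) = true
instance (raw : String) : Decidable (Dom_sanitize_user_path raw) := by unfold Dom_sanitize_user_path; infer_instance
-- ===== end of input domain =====

-- B replaces posixpath.normpath + re-split/filter with a single explicit-stack pass over raw.split('/'); same result, simpler.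

-- ===== PORT A =====
-- loop body of CPython's posixpath.normpath component loop (named helper, ported step for step)
def pvStepA (initialSlashes : Nat) (acc : List (List Char)) (comp : List Char) : List (List Char) :=
  if comp = [] ∨ comp = ['.'] then acc
  else if comp ≠ ['.', '.'] ∨ (initialSlashes = 0 ∧ acc = []) ∨ (acc ≠ [] ∧ acc.getLast? = some ['.', '.']) then
    acc ++ [comp]
  else if acc ≠ [] then acc.dropLast
  else acc

-- hand port of posixpath.normpath (CPython source, str branch), step for step
def pvNormpath (path : List Char) : List Char :=
  if path = [] then ['.']
  else
    let initialSlashes : Nat :=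
      if PySem.Chars.startswith path ['/'] then
        if PySem.Chars.startswith path ['/', '/'] && !(PySem.Chars.startswith path ['/', '/', '/']) then 2 else 1
      else 0
    let comps := PySem.Chars.splitOn path ['/']
    let newComps := comps.foldl (pvStepA initialSlashes) []
    let path1 := PySem.Chars.join ['/'] newComps
    let path2 := List.replicate initialSlashes '/' ++ path1
    if path2 = [] then ['.'] else path2

def sanitize_user_path (raw : String) : String :=
  -- raw.lstrip('/') ported by hand as dropWhile (exact for the one-character strip set "/")
  let norm := pvNormpath ('/' :: raw.toList.dropWhile (· == '/'))
  let parts := (PySem.Chars.splitOn norm ['/']).filter (fun p => p ≠ [])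
  -- Python raises PermissionError here; the equivalence proof shows this branch never fires
  if ['.', '.'] ∈ parts then ""
  else String.mk ('/' :: PySem.Chars.join ['/'] parts)

-- ===== PORT B =====
-- loop body of B's stack pass
def pvStepB (st : List (List Char)) (comp : List Char) : List (List Char) :=
  if comp = [] ∨ comp = ['.'] then st
  else if comp = ['.', '.'] then (if st ≠ [] then st.dropLast else st)
  else st ++ [comp]

def sanitize_user_path_alt (raw : String) : String :=
  let stack := (PySem.Chars.splitOn raw.toList ['/']).foldl pvStepB []
  String.mk ('/' :: PySem.Chars.join ['/'] stack)

-- ===== PRECONDITION & SPEC =====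
def Spec_sanitize_user_path (raw : String) (out : String) : Prop := out = sanitize_user_path_alt raw
instance (raw : String) (out : String) : Decidable (Spec_sanitize_user_path raw out) := by unfold Spec_sanitize_user_path; infer_instance

-- ===== CLAIM (what is proved, stated in full; the proofs are below) =====
def Claim_equal_sanitize_user_path : Prop := ∀ (raw : String), Dom_sanitize_user_path raw → Spec_sanitize_user_path raw (sanitize_user_path raw)

-- ===== LEMMAS AND PROOFS =====

-- simple structural single-char split, the proofs' model of splitOn ['/']
def pvSplit : List Char → List (List Char)
  | [] => [[]]
  | c :: s => if c = '/' then [] :: pvSplit s else (pvSplit s).modifyHead (c :: ·)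

theorem pvSplit_ne_nil (s : List Char) : pvSplit s ≠ [] := by
  induction s with
  | nil => simp [pvSplit]
  | cons c s ih =>
    simp only [pvSplit]
    split
    · simp
    · cases h : pvSplit s with
      | nil => exact absurd h ih
      | cons a t => simp [h]

theorem pvSplit_go_eq (fuel : Nat) (l cur : List Char) (acc : List (List Char))
    (h : l.length ≤ fuel) :
    PySem.Chars.splitOn.go ['/'] fuel l cur acc =
      acc.reverse ++ (pvSplit l).modifyHead (cur.reverse ++ ·) := by
  induction fuel generalizing l cur acc with
  | zero =>
    have : l = [] := by cases l <;> simp_all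
    subst this
    simp [PySem.Chars.splitOn.go, pvSplit]
  | succ fuel ih =>
    cases l with
    | nil => simp [PySem.Chars.splitOn.go, pvSplit]
    | cons c rest =>
      simp only [PySem.Chars.splitOn.go]
      by_cases hc : c = '/'
      · subst hc
        have hpre : List.isPrefixOf ['/'] ('/' :: rest) = true := by simp [List.isPrefixOf]
        rw [if_pos hpre, ih _ _ _ (by simpa using Nat.le_of_succ_le_succ h)]
        simp [pvSplit]
        cases hs : pvSplit rest with
        | nil => exact absurd hs (pvSplit_ne_nil rest)
        | cons a t => simp [hs]
      · have hpre : List.isPrefixOf ['/'] (c :: rest) = false := by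
          simp [List.isPrefixOf]
          exact fun h => hc h.symm
        rw [if_neg (by simp [hpre]), ih _ _ _ (by simpa using Nat.le_of_succ_le_succ h)]
        simp only [pvSplit, if_neg hc]
        cases hs : pvSplit rest with
        | nil => exact absurd hs (pvSplit_ne_nil rest)
        | cons a t => simp [hs]

theorem splitOn_eq_pvSplit (s : List Char) : PySem.Chars.splitOn s ['/'] = pvSplit s := by
  have := pvSplit_go_eq (s.length + 1) s [] [] (by omega)
  have h2 : List.modifyHead (fun x => ([] : List Char).reverse ++ x) (pvSplit s) = pvSplit s := by
    cases pvSplit s <;> simp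
  rw [PySem.Chars.splitOn, this, h2]
  simp

theorem pvSplit_no_slash (s : List Char) : ∀ x ∈ pvSplit s, '/' ∉ x := by
  induction s with
  | nil => intro x hx; simp [pvSplit] at hx; simp [hx]
  | cons c s ih =>
    intro x hx
    simp only [pvSplit] at hx
    by_cases hc : c = '/'
    · subst hc
      simp at hx
      rcases hx with hx | hx
      · simp [hx]
      · exact ih x hx
    · rw [if_neg hc] at hx
      cases hs : pvSplit s with
      | nil => exact absurd hs (pvSplit_ne_nil s)
      | cons a t =>
        rw [hs] at hx
        simp at hx
        rcases hx with hx | hx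
        · subst hx
          intro hmem
          simp at hmem
          rcases hmem with hmem | hmem
          · exact hc hmem.symm
          · exact ih a (by simp [hs]) hmem
        · exact ih x (by simp [hs, hx])

theorem pvSplit_slashes_append (u t : List Char) (hu : ∀ c ∈ u, c = '/') :
    pvSplit (u ++ t) = (u.map fun _ => ([] : List Char)) ++ pvSplit t := by
  induction u with
  | nil => simp
  | cons c u ih =>
    have hc : c = '/' := hu c (by simp)
    subst hc
    simp only [List.cons_append, pvSplit, if_pos rfl, List.map_cons]
    rw [ih (fun c hc => hu c (by simp [hc]))]
    simp

theorem pvSplit_noslash_append (x s : List Char) (hx : '/' ∉ x) :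
    pvSplit (x ++ s) = (pvSplit s).modifyHead (x ++ ·) := by
  induction x with
  | nil =>
    simp
    cases hs : pvSplit s with
    | nil => exact absurd hs (pvSplit_ne_nil s)
    | cons a t => simp
  | cons c x ih =>
    have hc : c ≠ '/' := by intro h; exact hx (by simp [h])
    simp only [List.cons_append, pvSplit, if_neg hc]
    rw [ih (by intro h; exact hx (by simp [h]))]
    cases hs : pvSplit s with
    | nil => exact absurd hs (pvSplit_ne_nil s)
    | cons a t => simp

theorem pvSplit_join (l : List (List Char)) (hl : ∀ x ∈ l, '/' ∉ x) (hne : l ≠ []) :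
    pvSplit (List.intercalate ['/'] l) = l := by
  induction l with
  | nil => exact absurd rfl hne
  | cons x l ih =>
    cases l with
    | nil =>
      have : List.intercalate ['/'] [x] = x := by simp [List.intercalate]
      rw [this]
      have := pvSplit_noslash_append x [] (hl x (by simp))
      simpa [pvSplit] using this
    | cons y l' =>
      have hstep : List.intercalate ['/'] (x :: y :: l') = x ++ '/' :: List.intercalate ['/'] (y :: l') := by
        simp [List.intercalate, List.intersperse]
      rw [hstep, pvSplit_noslash_append x _ (hl x (by simp))]
      have : pvSplit ('/' :: List.intercalate ['/'] (y :: l')) = [] :: pvSplit (List.intercalate ['/'] (y :: l')) := by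
        simp [pvSplit]
      rw [this, ih (fun z hz => hl z (by simp [hz])) (by simp)]
      simp

-- the two loop bodies agree as long as '..' has never been pushed
theorem foldA_eq_foldB (comps : List (List Char)) :
    ∀ acc, ['.', '.'] ∉ acc →
      comps.foldl (pvStepA 1) acc = comps.foldl pvStepB acc := by
  induction comps with
  | nil => intro acc _; rfl
  | cons comp comps ih =>
    intro acc hacc
    have hstep : pvStepA 1 acc comp = pvStepB acc comp := by
      unfold pvStepA pvStepB
      by_cases h0 : comp = [] ∨ comp = ['.']
      · simp [h0]
      · rw [if_neg h0, if_neg h0]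
        by_cases h2 : comp = ['.', '.']
        · have hlast : ¬ (acc ≠ [] ∧ acc.getLast? = some ['.', '.']) := by
            rintro ⟨-, hl⟩
            exact hacc (List.mem_of_getLast? hl)
          rw [if_neg (by simp [h2]; exact fun h _ => hlast ⟨h, by assumption⟩), if_pos h2]
        · rw [if_pos (Or.inl h2), if_neg h2]
    have hinv : ['.', '.'] ∉ pvStepB acc comp := by
      unfold pvStepB
      split
      · exact hacc
      · split
        · split
          · intro h; exact hacc (List.mem_of_mem_dropLast h)
          · exact hacc
        · intro h
          rcases List.mem_append.mp h with h | h
          · exact hacc h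
          · simp at h; exact ‹comp ≠ ['.', '.']› h.symm
    simp only [List.foldl_cons, hstep]
    exact ih _ hinv

theorem foldB_skip_empty (u : List Char) (L : List (List Char)) (acc : List (List Char)) :
    ((u.map fun _ => ([] : List Char)) ++ L).foldl pvStepB acc = L.foldl pvStepB acc := by
  induction u generalizing acc with
  | nil => rfl
  | cons c u ih => simpa [pvStepB] using ih acc

-- the stack only ever holds nonempty, slash-free components other than '..'
theorem foldB_inv (comps : List (List Char)) (hc : ∀ x ∈ comps, '/' ∉ x) :
    ∀ acc, (∀ x ∈ acc, x ≠ [] ∧ x ≠ ['.', '.'] ∧ '/' ∉ x) →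
      ∀ x ∈ comps.foldl pvStepB acc, x ≠ [] ∧ x ≠ ['.', '.'] ∧ '/' ∉ x := by
  induction comps with
  | nil => intro acc hacc; exact hacc
  | cons comp comps ih =>
    intro acc hacc
    refine ih (fun x hx => hc x (by simp [hx])) _ ?_
    unfold pvStepB
    split
    · exact hacc
    · split
      · split
        · exact fun x hx => hacc x (List.mem_of_mem_dropLast hx)
        · exact hacc
      · intro x hx
        rcases List.mem_append.mp hx with hx | hx
        · exact hacc x hx
        · simp at hx
          subst hx
          refine ⟨by tauto, by assumption, hc x (by simp)⟩

-- ===== VERDICT (by name: the statement is the Claim_ definition above) =====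
theorem sanitize_user_path_spec : Claim_equal_sanitize_user_path := by
  intro raw _
  unfold Spec_sanitize_user_path sanitize_user_path sanitize_user_path_alt
  dsimp only
  set t := raw.toList.dropWhile (· == '/') with ht
  have hthead : ∀ c rest, t = c :: rest → c ≠ '/' := by
    intro c rest h hc
    subst hc
    have := List.head?_dropWhile_not (· == '/') raw.toList
    rw [← ht, h] at this
    simp at this
  set S := (pvSplit t).foldl pvStepB [] with hS
  have hP : ∀ x ∈ S, x ≠ [] ∧ x ≠ ['.', '.'] ∧ '/' ∉ x :=
    foldB_inv (pvSplit t) (pvSplit_no_slash t) [] (by simp)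
  -- the B side computes S
  have hB : (PySem.Chars.splitOn raw.toList ['/']).foldl pvStepB [] = S := by
    rw [splitOn_eq_pvSplit]
    have hdecomp : raw.toList = raw.toList.takeWhile (· == '/') ++ t := by
      rw [ht, List.takeWhile_append_dropWhile]
    rw [hdecomp, pvSplit_slashes_append _ _ (fun c hc => by
      have := List.mem_takeWhile_imp hc
      simpa using this)]
    exact foldB_skip_empty _ _ _
  -- the A side: normpath of '/' ++ t
  have hsplit_cons : pvSplit ('/' :: t) = [] :: pvSplit t := by simp [pvSplit]
  have hs2 : PySem.Chars.startswith ('/' :: t) ['/', '/'] = false := by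
    cases h : t with
    | nil => simp [PySem.Chars.startswith, List.isPrefixOf]
    | cons c rest =>
      have hc := hthead c rest h
      simp [PySem.Chars.startswith, List.isPrefixOf]
      exact fun h' => hc h'.symm
  have hnorm : pvNormpath ('/' :: t) = '/' :: List.intercalate ['/'] S := by
    unfold pvNormpath
    rw [if_neg (by simp)]
    simp only [hs2, Bool.false_and, if_neg (by simp : ¬ (false = true)),
      if_pos (by simp [PySem.Chars.startswith, List.isPrefixOf] :
        PySem.Chars.startswith ('/' :: t) ['/'] = true)]
    rw [splitOn_eq_pvSplit, hsplit_cons]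
    have h0 : pvStepA 1 [] [] = [] := by simp [pvStepA]
    rw [List.foldl_cons, h0, foldA_eq_foldB _ [] (by simp), ← hS]
    simp [PySem.Chars.join, List.intercalate]
  rw [hnorm, splitOn_eq_pvSplit]
  have hsplit2 : pvSplit ('/' :: List.intercalate ['/'] S) = [] :: pvSplit (List.intercalate ['/'] S) := by
    simp [pvSplit]
  rw [hsplit2]
  have hparts : (([] :: pvSplit (List.intercalate ['/'] S)).filter (fun p => p ≠ [])) = S := by
    cases hcase : S with
    | nil => simp [List.intercalate, pvSplit]
    | cons a l =>
      rw [← hcase]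
      rw [pvSplit_join S (fun x hx => (hP x hx).2.2) (by rw [hcase]; simp)]
      have hself : List.filter (fun p => decide (p ≠ [])) S = S :=
        List.filter_eq_self.mpr (fun x hx => by simpa using (hP x hx).1)
      simp [hself]
      exact fun x hx => (hP x hx).1
  rw [hparts, hB]
  rw [if_neg (fun hmem => (hP _ hmem).2.1 rfl)]
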